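-- pv_equiv track=rewrite | github.com/kousiknandy/projecteuler | 37.py | truncated
-- ===== SOURCE A (Python) =====
-- def truncated(p):
--     i = 0
--     n = p
--     while n > 0:
--         yield n
--         n //= 10
--         i += 1
--     n = p
--     while i > 0:
--         yield n % (10 ** i)
--         i -= 1
-- ===== SOURCE B (Python) =====
-- def truncated(p):
--     # one pass: collect right-truncations while accumulating each left-truncation
--     # from the digits already consumed (running power, no 10**i recomputation)
--     rights = []
--     lefts = []
--     n = p
--     pw = 1
--     m = 0
--     while n > 0:
--         rights.append(n)
--         m += (n % 10) * pw
--         pw *= 10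
--         n //= 10
--         lefts.append(m)
--     yield from rights
--     yield from reversed(lefts)
-- ===== Notes on version B (the rewrite author's own statement) =====
-- stated objective: alternative
-- what changed: Replaces A's two-pass generator (second pass recomputing 10**i for each left-truncation) with a single pass that collects the right-truncations while accumulating each left-truncation from a running power and digit remainder, then emits rights followed by the reversed lefts.
import Mathlib
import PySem

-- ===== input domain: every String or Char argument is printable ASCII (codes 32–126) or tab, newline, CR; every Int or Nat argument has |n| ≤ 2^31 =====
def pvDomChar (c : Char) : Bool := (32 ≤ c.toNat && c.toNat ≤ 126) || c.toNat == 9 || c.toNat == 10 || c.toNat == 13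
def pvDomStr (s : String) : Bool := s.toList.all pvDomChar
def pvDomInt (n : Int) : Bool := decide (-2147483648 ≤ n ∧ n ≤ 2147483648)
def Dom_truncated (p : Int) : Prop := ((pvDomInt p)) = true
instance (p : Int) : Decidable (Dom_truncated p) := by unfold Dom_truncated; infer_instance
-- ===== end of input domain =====

-- B replaces A's two yield loops (second one recomputing 10**i) by one pass that
-- accumulates each left-truncation with a running power; objective: alternative/simpler.

-- termination helper for both loops' 'n //= 10'
theorem pvFdiv10_lt (n : Int) (h : 0 < n) : (PySem.Int.floordiv n 10).toNat < n.toNat := by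
  simp only [PySem.Int.floordiv, Int.fdiv_eq_ediv]
  simp only [show ((0:Int) ≤ 10 ∨ (10:Int) ∣ n) from Or.inl (by norm_num), if_pos]
  omega

-- ===== PORT A =====
-- while n > 0: yield n; n //= 10; i += 1   (returns the yielded list and the final i)
def truncatedLoop1 (n : Int) (i : Int) : List Int × Int :=
  if h : 0 < n then
    let r := truncatedLoop1 (PySem.Int.floordiv n 10) (i + 1)
    (n :: r.1, r.2)
  else ([], i)
termination_by n.toNat
decreasing_by exact pvFdiv10_lt n h

-- while i > 0: yield n % (10 ** i); i -= 1
def truncatedLoop2 (n : Int) (i : Int) : List Int :=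
  if _h : 0 < i then PySem.Int.mod n (10 ^ i.toNat) :: truncatedLoop2 n (i - 1) else []
termination_by i.toNat
decreasing_by omega

def truncated (p : Int) : List Int :=
  let r := truncatedLoop1 p 0
  r.1 ++ truncatedLoop2 p r.2

-- ===== PORT B =====
-- single pass: rights.append(n); m += (n % 10) * pw; pw *= 10; n //= 10; lefts.append(m)
def truncatedAltLoop (n pw m : Int) (rights lefts : List Int) : List Int × List Int :=
  if h : 0 < n then
    let rights' := rights ++ [n]
    let m' := m + (PySem.Int.mod n 10) * pw
    let pw' := pw * 10
    let n' := PySem.Int.floordiv n 10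
    truncatedAltLoop n' pw' m' rights' (lefts ++ [m'])
  else (rights, lefts)
termination_by n.toNat
decreasing_by exact pvFdiv10_lt n h

def truncated_alt (p : Int) : List Int :=
  let r := truncatedAltLoop p 1 0 [] []
  r.1 ++ r.2.reverse

-- ===== PRECONDITION & SPEC =====
def Spec_truncated (p : Int) (out : List Int) : Prop := out = truncated_alt p
instance (p : Int) (out : List Int) : Decidable (Spec_truncated p out) := by unfold Spec_truncated; infer_instance

-- ===== CLAIM (what is proved, stated in full; the proofs are below) =====
def Claim_equal_truncated : Prop := ∀ (p : Int), Dom_truncated p → Spec_truncated p (truncated p)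

-- ===== LEMMAS AND PROOFS =====

theorem pvFloordiv_eq (n : Int) : PySem.Int.floordiv n 10 = n / 10 := by
  simp only [PySem.Int.floordiv, Int.fdiv_eq_ediv]
  simp only [show ((0:Int) ≤ 10 ∨ (10:Int) ∣ n) from Or.inl (by norm_num), if_pos]
  ring

theorem pvMod_eq (n b : Int) (hb : 0 ≤ b) : PySem.Int.mod n b = n % b := by
  simp only [PySem.Int.mod, Int.fmod_eq_emod]
  simp only [show ((0:Int) ≤ b ∨ b ∣ n) from Or.inl hb, if_pos]
  ring

-- reference form of the right-truncation chain
def pvRts (n : Int) : List Int :=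
  if h : 0 < n then n :: pvRts (PySem.Int.floordiv n 10) else []
termination_by n.toNat
decreasing_by exact pvFdiv10_lt n h

-- ascending left-truncations of P scaled by pw
def pvLefts (P pw : Int) (d : Nat) : List Int :=
  List.map (fun j => P % (pw * 10 ^ (j + 1))) (List.range d)

theorem pvLefts_succ (P pw : Int) (d : Nat) :
    pvLefts P pw (d + 1) = P % (pw * 10) :: pvLefts P (pw * 10) d := by
  have hpow : ∀ j : Nat, pw * 10 ^ (j + 1 + 1) = pw * 10 * 10 ^ (j + 1) := fun j => by ring
  simp [pvLefts, List.range_succ_eq_map, List.map_map, Function.comp_def, hpow]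

theorem pvLoop1_spec (k : Nat) : ∀ n i : Int, n.toNat ≤ k →
    truncatedLoop1 n i = (pvRts n, i + (pvRts n).length) := by
  induction k with
  | zero =>
    intro n i hk
    rw [truncatedLoop1, pvRts]
    have : ¬ 0 < n := by omega
    simp [this]
  | succ k ih =>
    intro n i hk
    rw [truncatedLoop1, pvRts]
    by_cases h : 0 < n
    · have hlt := pvFdiv10_lt n h
      rw [ih _ (i + 1) (by omega)]
      simp [h]
      omega
    · simp [h]

theorem pvLoop2_spec (n : Int) (d : Nat) :
    truncatedLoop2 n (d : Int) = (pvLefts n 1 d).reverse := by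
  induction d with
  | zero => rw [truncatedLoop2]; simp [pvLefts]
  | succ d ih =>
    rw [truncatedLoop2]
    have h : (0:Int) < ((d+1 : Nat) : Int) := by omega
    have h1 : ((d+1 : Nat) : Int) - 1 = (d : Int) := by omega
    have h2 : ((d+1 : Nat) : Int).toNat = d + 1 := by omega
    have hpow : (0:Int) ≤ 10 ^ (d + 1) := by positivity
    simp only [h, dif_pos, h1, h2, ih, pvMod_eq _ _ hpow]
    simp [pvLefts, List.range_succ]

theorem pvLoopB_spec (k : Nat) : ∀ n pw m : Int, ∀ R L : List Int, n.toNat ≤ k →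
    0 < pw → 0 ≤ m → m < pw →
    truncatedAltLoop n pw m R L = (R ++ pvRts n, L ++ pvLefts (n * pw + m) pw (pvRts n).length) := by
  induction k with
  | zero =>
    intro n pw m R L hk hpw hm hmp
    rw [truncatedAltLoop, pvRts]
    have : ¬ 0 < n := by omega
    simp [this, pvLefts]
  | succ k ih =>
    intro n pw m R L hk hpw hm hmp
    rw [truncatedAltLoop, pvRts]
    by_cases h : 0 < n
    · have hlt := pvFdiv10_lt n h
      have hq : PySem.Int.floordiv n 10 = n / 10 := pvFloordiv_eq n
      have hr : PySem.Int.mod n 10 = n % 10 := pvMod_eq n 10 (by norm_num)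
      have hr0 : 0 ≤ n % 10 := Int.emod_nonneg n (by norm_num)
      have hr9 : n % 10 < 10 := Int.emod_lt_of_pos n (by norm_num)
      have hm'0 : 0 ≤ m + n % 10 * pw := by positivity
      have hm'lt : m + n % 10 * pw < pw * 10 := by nlinarith
      have h10 : 10 * (n / 10) + n % 10 = n := by omega
      have hP : n / 10 * (pw * 10) + (m + n % 10 * pw) = n * pw + m := by
        linear_combination pw * h10
      have hmod : (n * pw + m) % (pw * 10) = m + n % 10 * pw := by
        have : n * pw + m = m + n % 10 * pw + (pw * 10) * (n / 10) := by
          linear_combination (-pw) * h10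
        rw [this, Int.add_mul_emod_self_left]
        exact Int.emod_eq_of_lt hm'0 hm'lt
      simp only [h, dif_pos, hq, hr]
      rw [ih (n / 10) (pw * 10) (m + n % 10 * pw) (R ++ [n]) _
        (by rw [← hq]; omega) (by positivity) hm'0 hm'lt]
      rw [hP]
      simp only [List.length_cons, pvLefts_succ, hmod]
      simp
    · simp [h, pvLefts]

theorem truncated_eq (p : Int) : truncated p = truncated_alt p := by
  unfold truncated truncated_alt
  rw [pvLoop1_spec p.toNat p 0 le_rfl,
      pvLoopB_spec p.toNat p 1 0 [] [] le_rfl one_pos le_rfl zero_lt_one]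
  simp only [zero_add, mul_one, add_zero, List.nil_append]
  have : ∀ d : Nat, truncatedLoop2 p ((d : Int)) = (pvLefts p 1 d).reverse := pvLoop2_spec p
  simpa using this (pvRts p).length

-- ===== VERDICT (by name: the statement is the Claim_ definition above) =====
theorem truncated_spec : Claim_equal_truncated := by
  intro p _
  unfold Spec_truncated
  exact truncated_eq p
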